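-- pv_equiv track=rewrite | github.com/ShreevarGuptaa/YSP_SHREEVAR | Puzzle_Heist_2.py | round1
-- ===== SOURCE A (Python) =====
-- def digit_root(n):
--     while n > 9:
--         s = 0
--         for d in str(n):
--             s += int(d)
--         n = s
--     return n
--
-- def round1(word):
--     vowels = set(['a', 'e', 'i', 'o', 'u'])
--
--     letter = word[6]
--
--     unique_vowels = set()
--     for c in word:
--         lower_c = c.lower()
--         if lower_c in vowels:
--             unique_vowels.add(lower_c)
--     shift = len(unique_vowels)
--
--     if letter.isupper():
--         base = ord('A')
--     else:
--         base = ord('a')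
--     letter_pos = ord(letter) - base
--     shifted_pos = (letter_pos + shift) % 26
--     shifted_letter = chr(base + shifted_pos)
--
--     unique_consonants = set()
--     for c in word:
--         lower_c = c.lower()
--         if c.isalpha() and lower_c not in vowels:
--             unique_consonants.add(lower_c)
--     ascii_val = ord(shifted_letter) + len(unique_consonants)
--
--     return digit_root(ascii_val)
-- ===== SOURCE B (Python) =====
-- def round1(word):
--     vowels = {'a', 'e', 'i', 'o', 'u'}
--     letter = word[6]
--
--     unique_vowels = set()
--     unique_consonants = set()
--     for c in word:
--         lower_c = c.lower()
--         if lower_c in vowels: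
--             unique_vowels.add(lower_c)
--         elif c.isalpha():
--             unique_consonants.add(lower_c)
--
--     base = ord('A') if letter.isupper() else ord('a')
--     shifted = base + (ord(letter) - base + len(unique_vowels)) % 26
--     n = shifted + len(unique_consonants)
--     return 1 + (n - 1) % 9
-- ===== Notes on version B (the rewrite author's own statement) =====
-- stated objective: simpler
-- what changed: Fuses A's two word passes into one loop maintaining both the vowel and consonant sets, and replaces the iterative digit_root while-loop with the closed-form digital root 1 + (n - 1) % 9 (valid since n >= 65 here); one traversal instead of two plus no string-conversion loop gives a constant-factor speedup.
import Mathlib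
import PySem

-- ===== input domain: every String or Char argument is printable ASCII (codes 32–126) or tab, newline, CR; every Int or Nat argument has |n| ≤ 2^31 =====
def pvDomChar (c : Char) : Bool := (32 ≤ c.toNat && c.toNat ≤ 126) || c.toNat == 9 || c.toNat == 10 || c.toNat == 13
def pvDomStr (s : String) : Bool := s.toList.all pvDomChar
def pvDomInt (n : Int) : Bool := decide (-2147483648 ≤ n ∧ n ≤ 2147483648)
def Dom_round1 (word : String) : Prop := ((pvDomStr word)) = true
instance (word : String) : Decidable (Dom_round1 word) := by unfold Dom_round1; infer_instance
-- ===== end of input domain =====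

-- B fuses A's two word passes into one loop over the word maintaining both character sets,
-- and replaces the iterative digit_root helper with the closed-form digital root 1 + (n-1) % 9.


-- ===== PORT A =====
-- digit_root's inner 'for d in str(n): s += int(d)' pass; int(d) ported by hand as the digit
-- value (exact: str(n) for the nonnegative n reached here consists of digit characters)
def pvDigitSum (n : Int) : Int :=
  (PySem.Int.toChars n).foldl (fun s d => s + ((d.toNat : Int) - 48)) 0

-- the 'while n > 9' loop of digit_root; the fuel argument only makes it total
-- (fuel n.toNat suffices on every call made by round1, where 65 ≤ n)
def pvDigitRoot : Nat → Int → Int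
  | 0, n => n
  | fuel + 1, n => if n > 9 then pvDigitRoot fuel (pvDigitSum n) else n

def round1 (word : String) : Int :=
  let vowels : PySem.Set Char := PySem.Set.ofList ['a', 'e', 'i', 'o', 'u']
  match PySem.List.pyGet? word.toList 6 with
  | none => 0   -- word[6] raises IndexError; excluded by Pre_round1
  | some letter =>
    let uniqueVowels := word.toList.foldl
      (fun s c =>
        let lowerC := PySem.Chars.lowerChar c
        if PySem.Set.contains vowels lowerC then PySem.Set.add s lowerC else s)
      PySem.Set.empty
    let shift : Int := PySem.Set.len uniqueVowels
    let base : Int := if PySem.Chars.isupper letter then 65 else 97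
    let letterPos : Int := (letter.toNat : Int) - base
    let shiftedPos : Int := PySem.Int.mod (letterPos + shift) 26
    -- shifted_letter = chr(base + shifted_pos); A immediately takes ord of it, so the code is kept
    let shiftedOrd : Int := base + shiftedPos
    let uniqueConsonants := word.toList.foldl
      (fun s c =>
        let lowerC := PySem.Chars.lowerChar c
        if PySem.Chars.isalpha c && !(PySem.Set.contains vowels lowerC) then PySem.Set.add s lowerC else s)
      PySem.Set.empty
    let asciiVal : Int := shiftedOrd + PySem.Set.len uniqueConsonants
    pvDigitRoot asciiVal.toNat asciiVal

-- ===== PORT B =====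
def round1_alt (word : String) : Int :=
  let vowels : PySem.Set Char := PySem.Set.ofList ['a', 'e', 'i', 'o', 'u']
  match PySem.List.pyGet? word.toList 6 with
  | none => 0   -- word[6] raises IndexError; excluded by Pre_round1
  | some letter =>
    let sets := word.toList.foldl
      (fun (st : PySem.Set Char × PySem.Set Char) c =>
        let lowerC := PySem.Chars.lowerChar c
        if PySem.Set.contains vowels lowerC then (PySem.Set.add st.1 lowerC, st.2)
        else if PySem.Chars.isalpha c then (st.1, PySem.Set.add st.2 lowerC)
        else st)
      (PySem.Set.empty, PySem.Set.empty)
    let base : Int := if PySem.Chars.isupper letter then 65 else 97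
    let shifted : Int := base + PySem.Int.mod ((letter.toNat : Int) - base + PySem.Set.len sets.1) 26
    let n : Int := shifted + PySem.Set.len sets.2
    1 + PySem.Int.mod (n - 1) 9

-- ===== PRECONDITION & SPEC =====
-- Pre_ excludes exactly the words of length < 7, on which word[6] raises IndexError in A (and in B)
def Pre_round1 (word : String) : Prop := 7 ≤ word.toList.length
instance (word : String) : Decidable (Pre_round1 word) := by unfold Pre_round1; infer_instance
def pvWitness_round1 : String := "Shreevar"

def Spec_round1 (word : String) (out : Int) : Prop := out = round1_alt word
instance (word : String) (out : Int) : Decidable (Spec_round1 word out) := by unfold Spec_round1; infer_instance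

-- ===== CLAIM (what is proved, stated in full; the proofs are below) =====
def Claim_equal_round1 : Prop := ∀ (word : String), Dom_round1 word → Pre_round1 word → Spec_round1 word (round1 word)

-- ===== LEMMAS AND PROOFS =====

-- B's single pass computes exactly A's two passes
theorem pv_fold_pair (cs : List Char) (s1 s2 : PySem.Set Char) :
    cs.foldl
      (fun (st : PySem.Set Char × PySem.Set Char) c =>
        let lowerC := PySem.Chars.lowerChar c
        if PySem.Set.contains (PySem.Set.ofList ['a', 'e', 'i', 'o', 'u']) lowerC then (PySem.Set.add st.1 lowerC, st.2)
        else if PySem.Chars.isalpha c then (st.1, PySem.Set.add st.2 lowerC)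
        else st)
      (s1, s2)
    = (cs.foldl
        (fun s c =>
          let lowerC := PySem.Chars.lowerChar c
          if PySem.Set.contains (PySem.Set.ofList ['a', 'e', 'i', 'o', 'u']) lowerC then PySem.Set.add s lowerC else s)
        s1,
       cs.foldl
        (fun s c =>
          let lowerC := PySem.Chars.lowerChar c
          if PySem.Chars.isalpha c && !(PySem.Set.contains (PySem.Set.ofList ['a', 'e', 'i', 'o', 'u']) lowerC) then PySem.Set.add s lowerC else s)
        s2) := by
  induction cs generalizing s1 s2 with
  | nil => rfl
  | cons c cs ih =>
    simp only [List.foldl_cons]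
    by_cases hv : PySem.Set.contains (PySem.Set.ofList ['a', 'e', 'i', 'o', 'u']) (PySem.Chars.lowerChar c) = true
    · simp only [hv, Bool.not_true, Bool.and_false, reduceIte]
      exact ih _ _
    · rw [Bool.not_eq_true] at hv
      by_cases ha : PySem.Chars.isalpha c = true
      · simp only [hv, ha, Bool.not_false, Bool.and_true, reduceIte]
        exact ih _ _
      · rw [Bool.not_eq_true] at ha
        simp only [hv, ha, Bool.not_false, Bool.false_and]
        exact ih _ _

-- every element of A's consonant set is a lowercase ASCII letter
theorem pv_lowerChar_mem (c : Char) (h : PySem.Chars.isalpha c = true) :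
    PySem.Chars.lowerChar c ∈
      ['a','b','c','d','e','f','g','h','i','j','k','l','m','n','o','p','q','r','s','t','u','v','w','x','y','z'] := by
  have hlow : ∀ k : Nat, k < 123 → 97 ≤ k →
      Char.ofNat k ∈ ['a','b','c','d','e','f','g','h','i','j','k','l','m','n','o','p','q','r','s','t','u','v','w','x','y','z'] := by
    decide
  have hup : ∀ k : Nat, k < 91 → 65 ≤ k →
      Char.ofNat (k + 32) ∈ ['a','b','c','d','e','f','g','h','i','j','k','l','m','n','o','p','q','r','s','t','u','v','w','x','y','z'] := by
    decide
  simp only [PySem.Chars.isalpha, Bool.or_eq_true] at h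
  by_cases hu : PySem.Chars.isupper c = true
  · have hb : 65 ≤ c.toNat ∧ c.toNat ≤ 90 := by
      simpa [PySem.Chars.isupper, Char.le_def] using hu
    simp only [PySem.Chars.lowerChar, hu, if_true]
    exact hup c.toNat (by omega) hb.1
  · have hl : PySem.Chars.islower c = true := by tauto
    have hb : 97 ≤ c.toNat ∧ c.toNat ≤ 122 := by
      simpa [PySem.Chars.islower, Char.le_def] using hl
    simp only [PySem.Chars.lowerChar, hu]
    have := hlow c.toNat (by omega) hb.1
    simpa [Char.ofNat_toNat] using this

-- A's consonant fold stays a nodup list of lowercase letters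
theorem pv_cons_fold_bound (cs : List Char) (s : PySem.Set Char)
    (hnd : s.Nodup)
    (hsub : ∀ x ∈ s, x ∈ ['a','b','c','d','e','f','g','h','i','j','k','l','m','n','o','p','q','r','s','t','u','v','w','x','y','z']) :
    (cs.foldl
      (fun s c =>
        let lowerC := PySem.Chars.lowerChar c
        if PySem.Chars.isalpha c && !(PySem.Set.contains (PySem.Set.ofList ['a', 'e', 'i', 'o', 'u']) lowerC) then PySem.Set.add s lowerC else s)
      s).length ≤ 26 := by
  induction cs generalizing s with
  | nil =>
    simpa using List.Subperm.length_le (List.Nodup.subperm hnd hsub)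
  | cons c cs ih =>
    simp only [List.foldl_cons]
    by_cases hc : (PySem.Chars.isalpha c && !(PySem.Set.contains (PySem.Set.ofList ['a', 'e', 'i', 'o', 'u']) (PySem.Chars.lowerChar c))) = true
    · simp only [hc, if_true]
      refine ih _ (PySem.Set.nodup_add s (PySem.Chars.lowerChar c) hnd) ?_
      intro x hx
      rcases (PySem.Set.mem_add s (PySem.Chars.lowerChar c) x).mp hx with h | h
      · exact hsub x h
      · subst h
        refine pv_lowerChar_mem c ?_
        simp only [Bool.and_eq_true] at hc
        exact hc.1
    · simp only [hc]
      exact ih s hnd hsub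

-- the closed-form digital root agrees with the while-loop on the reachable range
theorem pv_digitRoot_closed (n : Int) (h1 : 65 ≤ n) (h2 : n ≤ 148) :
    pvDigitRoot n.toNat n = 1 + PySem.Int.mod (n - 1) 9 := by
  have hk : ∀ k : Nat, k < 149 → 65 ≤ k →
      pvDigitRoot k (k : Int) = 1 + PySem.Int.mod ((k : Int) - 1) 9 := by
    decide
  have hn : n = ((n.toNat : Nat) : Int) := by omega
  rw [hn]
  exact hk n.toNat (by omega) (by omega)

-- ===== VERDICT (by name: the statement is the Claim_ definition above) =====
theorem round1_spec : Claim_equal_round1 := by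
  intro word _hdom hpre
  unfold Spec_round1 round1 round1_alt
  rcases hget : PySem.List.pyGet? word.toList 6 with _ | letter
  · rfl
  simp only [pv_fold_pair]
  -- the two sides now share the letter, vowel set and consonant set; compare the final reduction
  set uv := word.toList.foldl
      (fun s c =>
        let lowerC := PySem.Chars.lowerChar c
        if PySem.Set.contains (PySem.Set.ofList ['a', 'e', 'i', 'o', 'u']) lowerC then PySem.Set.add s lowerC else s)
      PySem.Set.empty with huv
  set uc := word.toList.foldl
      (fun s c =>
        let lowerC := PySem.Chars.lowerChar c
        if PySem.Chars.isalpha c && !(PySem.Set.contains (PySem.Set.ofList ['a', 'e', 'i', 'o', 'u']) lowerC) then PySem.Set.add s lowerC else s)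
      PySem.Set.empty with huc
  set base : Int := if PySem.Chars.isupper letter then 65 else 97 with hbase
  have hb : base = 65 ∨ base = 97 := by
    by_cases h : PySem.Chars.isupper letter = true <;> simp [hbase, h]
  have hmod1 : 0 ≤ PySem.Int.mod ((letter.toNat : Int) - base + PySem.Set.len uv) 26 :=
    PySem.Int.mod_nonneg _ (by norm_num)
  have hmod2 : PySem.Int.mod ((letter.toNat : Int) - base + PySem.Set.len uv) 26 < 26 :=
    PySem.Int.mod_lt _ (by norm_num)
  have hlen : uc.length ≤ 26 := by
    rw [huc]
    exact pv_cons_fold_bound word.toList PySem.Set.empty (by simp [PySem.Set.empty]) (by simp [PySem.Set.empty])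
  have hlen' : PySem.Set.len uc ≤ 26 := by
    simpa [PySem.Set.len] using (by exact_mod_cast hlen : (uc.length : Int) ≤ 26)
  have hlen0 : 0 ≤ PySem.Set.len uc := by simp [PySem.Set.len]
  set n : Int := base + PySem.Int.mod ((letter.toNat : Int) - base + PySem.Set.len uv) 26 + PySem.Set.len uc with hn
  exact pv_digitRoot_closed n (by rcases hb with h | h <;> omega) (by rcases hb with h | h <;> omega)
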